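-- pv_equiv track=rewrite | github.com/hamidzr/next-block-prediction | doTokenize.py | clusterTokens
-- ===== SOURCE A (Python) =====
-- def clusterTokens(tokenStats):
--     LOW_THRESHOLD = 10 # blocks with lesser counts will be considered low freq
--     lowFreqs = list(filter(lambda pair: pair[1] < LOW_THRESHOLD, tokenStats.items()))
--     highFreqs = list(filter(lambda pair: pair[1] >= LOW_THRESHOLD, tokenStats.items()))
--     langBlocks = []
--     for p in highFreqs:
--         if p[0] not in langBlocks:
--             langBlocks.append(p[0])
--     return lowFreqs, highFreqs, langBlocks
-- ===== SOURCE B (Python) =====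
-- def clusterTokens(tokenStats):
--     LOW_THRESHOLD = 10
--     # Stable sort by the boolean "is high-frequency": all low-count pairs come
--     # first (in original order), then all high-count pairs (in original order);
--     # then split the sorted list at the first high-frequency pair.
--     ordered = sorted(tokenStats.items(), key=lambda p: p[1] >= LOW_THRESHOLD)
--     cut = len(ordered)
--     for i, p in enumerate(ordered):
--         if p[1] >= LOW_THRESHOLD:
--             cut = i
--             break
--     lowFreqs = ordered[:cut]
--     highFreqs = ordered[cut:]
--     langBlocks = [k for k, _ in highFreqs]
--     return lowFreqs, highFreqs, langBlocks
-- ===== Notes on version B (the rewrite author's own statement) =====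
-- stated objective: alternative
-- what changed: Instead of A's two filter passes plus a quadratic membership-dedup loop, B stable-sorts the items by the boolean key count>=10 (lows first, highs last, each in original order), splits the sorted list at the first high-frequency pair, and takes langBlocks as the keys of the high half (dict keys are unique, so no dedup is needed). Pre_ excludes association lists with duplicate keys, which a Python dict (tokenStats.items()) can never produce and on which A's dedup is accidental.
import Mathlib
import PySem

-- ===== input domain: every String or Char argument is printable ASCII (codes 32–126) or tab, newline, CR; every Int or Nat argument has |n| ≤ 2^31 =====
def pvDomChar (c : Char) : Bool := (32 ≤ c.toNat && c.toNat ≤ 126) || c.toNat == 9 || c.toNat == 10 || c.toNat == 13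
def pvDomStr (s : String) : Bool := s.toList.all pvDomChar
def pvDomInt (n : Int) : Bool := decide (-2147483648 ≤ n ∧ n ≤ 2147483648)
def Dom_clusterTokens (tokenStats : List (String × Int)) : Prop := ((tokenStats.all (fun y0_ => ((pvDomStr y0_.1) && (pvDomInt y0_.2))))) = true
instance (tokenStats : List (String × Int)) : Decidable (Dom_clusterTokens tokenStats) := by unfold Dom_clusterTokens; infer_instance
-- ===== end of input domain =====

-- B replaces A's two filter passes and membership-dedup loop by a stable sort on the boolean
-- key count>=10 followed by a split at the first high-frequency pair (objective: alternative).

-- ===== PORT A =====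
def clusterTokens (tokenStats : List (String × Int)) : (List (String × Int)) × (List (String × Int)) × List String :=
  let lowFreqs := tokenStats.filter (fun pair => decide (pair.2 < 10))
  let highFreqs := tokenStats.filter (fun pair => decide (10 ≤ pair.2))
  let langBlocks := highFreqs.foldl (fun acc p => if p.1 ∈ acc then acc else acc ++ [p.1]) ([] : List String)
  (lowFreqs, highFreqs, langBlocks)

-- ===== PORT B =====
-- the 'for i, p in enumerate(ordered): if p[1] >= 10: cut = i; break' search, cut = len if no hit
def pvFindCut : List (String × Int) → Nat
  | [] => 0
  | p :: rest => if 10 ≤ p.2 then 0 else pvFindCut rest + 1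

def clusterTokens_alt (tokenStats : List (String × Int)) : (List (String × Int)) × (List (String × Int)) × List String :=
  let ordered := PySem.List.sorted tokenStats (fun p => decide (10 ≤ p.2)) false
  let cut := pvFindCut ordered
  let lowFreqs := PySem.List.slice ordered none (some (cut : Int))
  let highFreqs := PySem.List.slice ordered (some (cut : Int)) none
  let langBlocks := highFreqs.map Prod.fst
  (lowFreqs, highFreqs, langBlocks)

-- ===== PRECONDITION & SPEC =====
-- tokenStats is a Python dict, whose keys are necessarily distinct; Pre_ only rules out the
-- association lists with duplicate keys that the List encoding admits but no dict input produces
-- (there A's dedup loop and B's plain key projection differ, and neither order is specified).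
def pvKeysDistinct : List String → Bool
  | [] => true
  | k :: rest => (!rest.contains k) && pvKeysDistinct rest
def Pre_clusterTokens (tokenStats : List (String × Int)) : Prop :=
  pvKeysDistinct (tokenStats.map Prod.fst) = true
instance (tokenStats : List (String × Int)) : Decidable (Pre_clusterTokens tokenStats) := by unfold Pre_clusterTokens; infer_instance
def pvWitness_clusterTokens : (List (String × Int)) := [("a", 3), ("b", 12), ("c", 10)]

def Spec_clusterTokens (tokenStats : List (String × Int)) (out : (List (String × Int)) × (List (String × Int)) × List String) : Prop := out = clusterTokens_alt tokenStats
instance (tokenStats : List (String × Int)) (out : (List (String × Int)) × (List (String × Int)) × List String) : Decidable (Spec_clusterTokens tokenStats out) := by unfold Spec_clusterTokens; infer_instance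

-- ===== CLAIM (what is proved, stated in full; the proofs are below) =====
def Claim_equal_clusterTokens : Prop := ∀ (tokenStats : List (String × Int)), Dom_clusterTokens tokenStats → Pre_clusterTokens tokenStats → Spec_clusterTokens tokenStats (clusterTokens tokenStats)

-- ===== LEMMAS AND PROOFS =====

theorem pvKeysDistinct_iff_nodup (l : List String) : pvKeysDistinct l = true ↔ l.Nodup := by
  induction l with
  | nil => simp [pvKeysDistinct]
  | cons k rest ih => simp [pvKeysDistinct, ih]

-- inserting a low pair into lows ++ highs puts it at the end of the lows
theorem insertBy_low (x : String × Int) (hx : ¬ 10 ≤ x.2) (L H : List (String × Int))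
    (hL : ∀ y ∈ L, ¬ 10 ≤ y.2) (hH : ∀ y ∈ H, 10 ≤ y.2) :
    PySem.List.insertBy
      (fun a b => decide ((decide (10 ≤ a.2) : Bool) < (decide (10 ≤ b.2) : Bool))) x (L ++ H)
    = L ++ x :: H := by
  induction L with
  | nil =>
    cases H with
    | nil => simp [PySem.List.insertBy]
    | cons h t =>
      have hh := hH h (by simp)
      simp [PySem.List.insertBy, hx, hh]
  | cons l L' ih =>
    have hl := hL l (by simp)
    have := ih (fun y hy => hL y (List.mem_cons_of_mem _ hy))
    simp [PySem.List.insertBy, hx, hl, this]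

-- B's insertion sort with the boolean key partitions: lows first, highs second, orders kept
theorem foldl_insertBy_partition (ts L H : List (String × Int))
    (hL : ∀ y ∈ L, ¬ 10 ≤ y.2) (hH : ∀ y ∈ H, 10 ≤ y.2) :
    ts.foldl
      (fun acc x => PySem.List.insertBy
        (fun a b => decide ((decide (10 ≤ a.2) : Bool) < (decide (10 ≤ b.2) : Bool))) x acc)
      (L ++ H)
    = (L ++ ts.filter (fun pair => decide (pair.2 < 10)))
      ++ (H ++ ts.filter (fun pair => decide (10 ≤ pair.2))) := by
  induction ts generalizing L H with
  | nil => simp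
  | cons x rest ih =>
    by_cases hx : 10 ≤ x.2
    · have hH' : ∀ y ∈ H ++ [x], 10 ≤ y.2 := by
        intro y hy
        rcases List.mem_append.mp hy with h | h
        · exact hH y h
        · simp at h; subst h; exact hx
      have hins : PySem.List.insertBy
          (fun a b => decide ((decide (10 ≤ a.2) : Bool) < (decide (10 ≤ b.2) : Bool))) x (L ++ H)
          = (L ++ H) ++ [x] := by
        apply PySem.List.insertBy_of_forall_not_before
        intro y _
        simp [hx]
      have hx' : ¬ x.2 < 10 := by omega
      rw [List.foldl_cons, hins, List.append_assoc, ih L (H ++ [x]) hL hH']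
      simp [hx, hx']
    · have hL' : ∀ y ∈ L ++ [x], ¬ 10 ≤ y.2 := by
        intro y hy
        rcases List.mem_append.mp hy with h | h
        · exact hL y h
        · simp at h; subst h; exact hx
      have hx' : x.2 < 10 := by omega
      have hsplit : L ++ x :: H = (L ++ [x]) ++ H := by simp
      rw [List.foldl_cons, insertBy_low x hx L H hL hH, hsplit, ih (L ++ [x]) H hL' hH]
      simp [hx, hx']

theorem sorted_partition (ts : List (String × Int)) :
    PySem.List.sorted ts (fun p => decide (10 ≤ p.2)) false
    = ts.filter (fun pair => decide (pair.2 < 10)) ++ ts.filter (fun pair => decide (10 ≤ pair.2)) := by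
  rw [PySem.List.sorted_eq_foldl_insertBy]
  have := foldl_insertBy_partition ts [] [] (by simp) (by simp)
  simpa using this

-- the break-search finds the boundary of the partition
theorem pvFindCut_partition (L H : List (String × Int))
    (hL : ∀ y ∈ L, ¬ 10 ≤ y.2) (hH : ∀ y ∈ H, 10 ≤ y.2) :
    pvFindCut (L ++ H) = L.length := by
  induction L with
  | nil =>
    cases H with
    | nil => simp [pvFindCut]
    | cons h t => have := hH h (by simp); simp [pvFindCut, this]
  | cons l L' ih =>
    have hl := hL l (by simp)
    simp [pvFindCut, hl, ih (fun y hy => hL y (List.mem_cons_of_mem _ hy))]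

-- A's dedup loop appends every key when the keys are distinct and absent from the accumulator
theorem dedup_foldl_eq (l : List (String × Int)) (acc : List String)
    (hnd : (l.map Prod.fst).Nodup) (hdisj : ∀ p ∈ l, p.1 ∉ acc) :
    l.foldl (fun acc p => if p.1 ∈ acc then acc else acc ++ [p.1]) acc
    = acc ++ l.map Prod.fst := by
  induction l generalizing acc with
  | nil => simp
  | cons p rest ih =>
    have hmem : p.1 ∉ acc := hdisj p (by simp)
    rw [List.map_cons, List.nodup_cons] at hnd
    obtain ⟨h1, hnd'⟩ := hnd
    have hne : ∀ q ∈ rest, q.1 ≠ p.1 := by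
      intro q hq h
      exact h1 (h ▸ List.mem_map_of_mem hq)
    have := ih (acc ++ [p.1]) hnd' (by
      intro q hq
      simp only [List.mem_append, List.mem_singleton]
      rintro (h | h)
      · exact hdisj q (List.mem_cons_of_mem _ hq) h
      · exact hne q hq h)
    simp [List.foldl_cons, hmem, this]

-- ===== VERDICT (by name: the statement is the Claim_ definition above) =====
theorem clusterTokens_spec : Claim_equal_clusterTokens := by
  intro ts _ hpre
  replace hpre := (pvKeysDistinct_iff_nodup _).mp hpre
  unfold Spec_clusterTokens clusterTokens clusterTokens_alt
  dsimp only
  rw [sorted_partition]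
  set lows := ts.filter (fun pair => decide (pair.2 < 10)) with hlows
  set highs := ts.filter (fun pair => decide (10 ≤ pair.2)) with hhighs
  have hLlow : ∀ y ∈ lows, ¬ 10 ≤ y.2 := by
    intro y hy; have := List.of_mem_filter hy; simp at this; omega
  have hHhigh : ∀ y ∈ highs, 10 ≤ y.2 := by
    intro y hy; have := List.of_mem_filter hy; simpa using this
  rw [pvFindCut_partition lows highs hLlow hHhigh]
  rw [PySem.List.slice_to_natCast, PySem.List.slice_from_natCast]
  rw [List.take_left, List.drop_left]
  have hsub : (highs.map Prod.fst).Sublist (ts.map Prod.fst) :=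
    List.filter_sublist.map Prod.fst
  have hnd : (highs.map Prod.fst).Nodup := hpre.sublist hsub
  rw [dedup_foldl_eq _ _ hnd (by simp)]
  simp
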